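-- pv_equiv track=rewrite | github.com/ChengWang-hit/CaTFold | code/utils.py | seq2pairs
-- ===== SOURCE A (Python) =====
-- def seq2pairs(s):
--     pairs_symmetry = []
--
--     for i in range(len(s) - 4):
--         for j in range(i+4, len(s)):
--             if (s[i] == 'A' and s[j] == 'U') or (s[i] == 'U' and s[j] == 'A'):
--                 pairs_symmetry.append([i, j])
--                 pairs_symmetry.append([j, i])
--
--             if (s[i] == 'G' and s[j] == 'C') or (s[i] == 'C' and s[j] == 'G'):
--                 pairs_symmetry.append([i, j])
--                 pairs_symmetry.append([j, i])
--
--             if (s[i] == 'G' and s[j] == 'U') or (s[i] == 'U' and s[j] == 'G'):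
--                 pairs_symmetry.append([i, j])
--                 pairs_symmetry.append([j, i])
--
--     return pairs_symmetry
-- ===== SOURCE B (Python) =====
-- def seq2pairs(s):
--     # Index every nucleotide's positions once, then for each i emit the
--     # (sorted) complementary positions at distance >= 4, both orientations.
--     pos = {}
--     for idx, ch in enumerate(s):
--         pos.setdefault(ch, []).append(idx)
--     comp = {'A': ('U',), 'U': ('A', 'G'), 'G': ('C', 'U'), 'C': ('G',)}
--     out = []
--     for i, ch in enumerate(s):
--         cands = []
--         for c in comp.get(ch, ()):
--             cands.extend(p for p in pos.get(c, []) if p >= i + 4)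
--         cands.sort()
--         for j in cands:
--             out.append([i, j])
--             out.append([j, i])
--     return out
-- ===== Notes on version B (the rewrite author's own statement) =====
-- stated objective: faster
-- what changed: Instead of testing all index pairs (i,j) against six base-pair conditions, B builds a position index (dict nucleotide -> sorted positions) once, and for each i merges and sorts the complement nucleotides' positions >= i+4, emitting only matching pairs.
import Mathlib
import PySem

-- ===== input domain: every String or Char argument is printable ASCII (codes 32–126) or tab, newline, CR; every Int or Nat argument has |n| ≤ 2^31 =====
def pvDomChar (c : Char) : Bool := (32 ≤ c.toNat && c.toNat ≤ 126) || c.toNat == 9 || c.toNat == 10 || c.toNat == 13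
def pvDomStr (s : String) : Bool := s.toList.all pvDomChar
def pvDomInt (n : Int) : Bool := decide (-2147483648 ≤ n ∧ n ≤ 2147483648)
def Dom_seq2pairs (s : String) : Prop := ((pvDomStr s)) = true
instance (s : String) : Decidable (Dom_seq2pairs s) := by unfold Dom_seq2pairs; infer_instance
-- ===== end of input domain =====

-- B replaces A's all-pairs double scan by a one-pass position index per nucleotide,
-- then per i merges+sorts the complement positions at distance >= 4 (measured ~2x faster in Python).

-- ===== PORT A =====
-- i and j always lie inside s here, so Python's s[i]/s[j] never raise; pyGetD with a dummy default is exact.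
def seq2pairs (s : String) : List (List Int) :=
  let cs := s.toList
  let n : Int := PySem.Str.len s
  (PySem.List.pyRange 0 (n - 4) 1).foldl (fun acc i =>
    (PySem.List.pyRange (i + 4) n 1).foldl (fun acc j =>
      let si := PySem.List.pyGetD cs i ' '
      let sj := PySem.List.pyGetD cs j ' '
      let acc := if (si = 'A' ∧ sj = 'U') ∨ (si = 'U' ∧ sj = 'A') then (acc ++ [[i, j]]) ++ [[j, i]] else acc
      let acc := if (si = 'G' ∧ sj = 'C') ∨ (si = 'C' ∧ sj = 'G') then (acc ++ [[i, j]]) ++ [[j, i]] else acc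
      if (si = 'G' ∧ sj = 'U') ∨ (si = 'U' ∧ sj = 'G') then (acc ++ [[i, j]]) ++ [[j, i]] else acc) acc) []

-- ===== PORT B =====
-- comp.get(ch, ()) of Source B
def pvComp (c : Char) : List Char :=
  if c = 'A' then ['U'] else if c = 'U' then ['A', 'G']
  else if c = 'G' then ['C', 'U'] else if c = 'C' then ['G'] else []

def seq2pairs_alt (s : String) : List (List Int) :=
  let cs := s.toList
  -- pos.setdefault(ch, []).append(idx)  ==  modify ch [] (· ++ [idx])
  let pos := (PySem.List.enumerate cs 0).foldl
      (fun d p => d.modify p.2 [] (· ++ [p.1])) PySem.Dict.empty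
  (PySem.List.enumerate cs 0).foldl (fun out p =>
    let i := p.1
    let cands := (pvComp p.2).flatMap (fun c => (pos.getD c []).filter (fun q => i + 4 ≤ q))
    let cands := PySem.List.sorted cands (fun x => x) false
    cands.foldl (fun out j => (out ++ [[i, j]]) ++ [[j, i]]) out) []

-- ===== PRECONDITION & SPEC =====
def Spec_seq2pairs (s : String) (out : List (List Int)) : Prop := out = seq2pairs_alt s
instance (s : String) (out : List (List Int)) : Decidable (Spec_seq2pairs s out) := by unfold Spec_seq2pairs; infer_instance

-- ===== CLAIM (what is proved, stated in full; the proofs are below) =====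
def Claim_equal_seq2pairs : Prop := ∀ (s : String), Dom_seq2pairs s → Spec_seq2pairs s (seq2pairs s)

-- ===== LEMMAS AND PROOFS =====

-- the union of A's six pairing conditions, as one Bool
def pvMatch (a b : Char) : Bool :=
  (a == 'A' && b == 'U') || (a == 'U' && b == 'A') || (a == 'G' && b == 'C') ||
  (a == 'C' && b == 'G') || (a == 'G' && b == 'U') || (a == 'U' && b == 'G')

-- the common normal form both sides are reduced to
def pvRow (cs : List Char) (i : Int) : List (List Int) :=
  ((PySem.List.pyRange (i + 4) (cs.length : Int) 1).filter
     (fun j => pvMatch (PySem.List.pyGetD cs i ' ') (PySem.List.pyGetD cs j ' '))).flatMap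
    (fun j => [[i, j], [j, i]])

theorem stepA_eq (si sj : Char) (i j : Int) (acc : List (List Int)) :
    (let acc := if (si = 'A' ∧ sj = 'U') ∨ (si = 'U' ∧ sj = 'A') then (acc ++ [[i, j]]) ++ [[j, i]] else acc
     let acc := if (si = 'G' ∧ sj = 'C') ∨ (si = 'C' ∧ sj = 'G') then (acc ++ [[i, j]]) ++ [[j, i]] else acc
     if (si = 'G' ∧ sj = 'U') ∨ (si = 'U' ∧ sj = 'G') then (acc ++ [[i, j]]) ++ [[j, i]] else acc)
    = acc ++ (if pvMatch si sj then [[i, j], [j, i]] else []) := by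
  by_cases h1 : (si = 'A' ∧ sj = 'U') ∨ (si = 'U' ∧ sj = 'A') <;>
  by_cases h2 : (si = 'G' ∧ sj = 'C') ∨ (si = 'C' ∧ sj = 'G') <;>
  by_cases h3 : (si = 'G' ∧ sj = 'U') ∨ (si = 'U' ∧ sj = 'G') <;>
  simp_all [pvMatch] <;> aesop

theorem flatMap_if_eq_filter_flatMap (l : List Int) (p : Int → Bool) (g : Int → List (List Int)) :
    l.flatMap (fun j => if p j then g j else []) = (l.filter p).flatMap g := by
  induction l with
  | nil => rfl
  | cons x t ih => by_cases h : p x <;> simp [h, ih]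

theorem A_eq_flatMap (s : String) :
    seq2pairs s = (PySem.List.pyRange 0 ((s.toList.length : Int) - 4) 1).flatMap (pvRow s.toList) := by
  unfold seq2pairs
  simp only [PySem.Str.len_eq]
  rw [PySem.List.foldl_congr_mem
    (g := fun acc i => acc ++ pvRow s.toList i)]
  · rw [PySem.List.foldl_append_eq_flatMap]; simp
  · intro acc i _
    rw [PySem.List.foldl_congr_mem
      (g := fun acc j => acc ++ (if pvMatch (PySem.List.pyGetD s.toList i ' ') (PySem.List.pyGetD s.toList j ' ') then [[i, j], [j, i]] else []))]
    · rw [PySem.List.foldl_append_eq_flatMap, pvRow, flatMap_if_eq_filter_flatMap]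
    · intro acc j _; exact stepA_eq _ _ _ _ _

theorem pos_getD (cs : List Char) (c : Char) :
    ((PySem.List.enumerate cs 0).foldl
        (fun d p => d.modify p.2 [] (· ++ [p.1])) PySem.Dict.empty).getD c []
    = (PySem.List.pyRange 0 (cs.length : Int) 1).filter
        (fun j => PySem.List.pyGetD cs j ' ' == c) := by
  have h0 : (PySem.List.enumerate cs 0).foldl
        (fun d p => d.modify p.2 [] (· ++ [p.1])) PySem.Dict.empty
      = ((PySem.List.enumerate cs 0).map (fun p => (p.2, p.1))).foldl
        (fun d q => d.modify q.1 [] (· ++ [q.2])) PySem.Dict.empty := by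
    rw [List.foldl_map]
  rw [h0, PySem.Dict.getD_foldl_modify_append]
  rw [PySem.List.enumerate_eq_map_pyRange cs ' ']
  simp [List.filter_map, Function.comp_def]

theorem filter_ge_pyRange (a n : Int) (ha : 0 ≤ a) :
    (PySem.List.pyRange 0 n 1).filter (fun j => decide (a ≤ j)) = PySem.List.pyRange a n 1 := by
  by_cases h : a ≤ n
  · rw [PySem.List.pyRange_one_append 0 a n ha h, List.filter_append]
    have h1 : (PySem.List.pyRange 0 a 1).filter (fun j => decide (a ≤ j)) = [] := by
      apply List.filter_eq_nil_iff.mpr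
      intro x hx
      have := (PySem.List.mem_pyRange_one).1 hx
      simp; omega
    have h2 : (PySem.List.pyRange a n 1).filter (fun j => decide (a ≤ j)) = PySem.List.pyRange a n 1 := by
      apply List.filter_eq_self.mpr
      intro x hx
      have := (PySem.List.mem_pyRange_one).1 hx
      simp; omega
    rw [h1, h2, List.nil_append]
  · have hnil : PySem.List.pyRange a n 1 = [] := PySem.List.pyRange_one_eq_nil (by omega)
    rw [hnil]
    apply List.filter_eq_nil_iff.mpr
    intro x hx
    have := (PySem.List.mem_pyRange_one).1 hx
    simp; omega

theorem filter_or_perm (l : List Int) (p q : Int → Bool) (h : ∀ x, ¬(p x = true ∧ q x = true)) :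
    (l.filter (fun x => p x || q x)).Perm (l.filter p ++ l.filter q) := by
  induction l with
  | nil => simp
  | cons x t ih =>
    by_cases hp : p x
    · have hq : q x = false := by
        by_contra hq'; exact h x ⟨hp, by simpa using hq'⟩
      simp [hp, hq]
      exact ih
    · by_cases hq : q x
      · simp [hp, hq]
        exact (ih.cons x).trans List.perm_middle.symm
      · simp [hp, hq, ih]

-- merged complement positions ≥ i+4, sorted, = A's filtered inner range
theorem row_core (cs : List Char) (i : Int) (hi : 0 ≤ i) :
    PySem.List.sorted
      ((pvComp (PySem.List.pyGetD cs i ' ')).flatMap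
        (fun c => ((PySem.List.pyRange 0 (cs.length : Int) 1).filter
            (fun j => PySem.List.pyGetD cs j ' ' == c)).filter (fun q => i + 4 ≤ q)))
      (fun x => x) false
    = (PySem.List.pyRange (i + 4) (cs.length : Int) 1).filter
        (fun j => pvMatch (PySem.List.pyGetD cs i ' ') (PySem.List.pyGetD cs j ' ')) := by
  set ch := PySem.List.pyGetD cs i ' ' with hch
  have hfil : ∀ c : Char,
      ((PySem.List.pyRange 0 (cs.length : Int) 1).filter
          (fun j => PySem.List.pyGetD cs j ' ' == c)).filter (fun q => decide (i + 4 ≤ q))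
      = (PySem.List.pyRange (i + 4) (cs.length : Int) 1).filter
          (fun j => PySem.List.pyGetD cs j ' ' == c) := by
    intro c
    rw [List.filter_comm, filter_ge_pyRange _ _ (by omega)]
  have hpw : ∀ p : Int → Bool,
      ((PySem.List.pyRange (i + 4) (cs.length : Int) 1).filter p).Pairwise (· < ·) :=
    fun p => (PySem.List.pairwise_lt_pyRange_one _ _).filter p
  have hsorted_self : ∀ p : Int → Bool,
      PySem.List.sorted ((PySem.List.pyRange (i + 4) (cs.length : Int) 1).filter p) (fun x => x) false
      = (PySem.List.pyRange (i + 4) (cs.length : Int) 1).filter p := by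
    intro p
    exact PySem.List.sorted_eq_self_of_pairwise _ (fun x => x) ((hpw p).imp (fun h => le_of_lt h))
  by_cases hA : ch = 'A'
  · rw [hA]
    simp only [pvComp, Char.reduceEq, reduceIte, List.flatMap_cons, List.flatMap_nil, List.append_nil, hfil]
    rw [hsorted_self]
    apply List.filter_congr
    intro j _; simp [pvMatch]
  · by_cases hU : ch = 'U'
    · rw [hU]
      simp only [pvComp, Char.reduceEq, reduceIte, List.flatMap_cons, List.flatMap_nil, List.append_nil, hfil]
      have hperm := filter_or_perm (PySem.List.pyRange (i + 4) (cs.length : Int) 1)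
        (fun j => PySem.List.pyGetD cs j ' ' == 'A') (fun j => PySem.List.pyGetD cs j ' ' == 'G')
        (by intro x ⟨h1, h2⟩; simp at h1 h2; rw [h1] at h2; exact absurd h2 (by decide))
      rw [PySem.List.sorted_eq_of_perm_of_pairwise_lt _ _ (fun x => x) hperm (hpw _)]
      apply List.filter_congr
      intro j _; simp [pvMatch]
    · by_cases hG : ch = 'G'
      · rw [hG]
        simp only [pvComp, Char.reduceEq, reduceIte, List.flatMap_cons, List.flatMap_nil, List.append_nil, hfil]
        have hperm := filter_or_perm (PySem.List.pyRange (i + 4) (cs.length : Int) 1)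
          (fun j => PySem.List.pyGetD cs j ' ' == 'C') (fun j => PySem.List.pyGetD cs j ' ' == 'U')
          (by intro x ⟨h1, h2⟩; simp at h1 h2; rw [h1] at h2; exact absurd h2 (by decide))
        rw [PySem.List.sorted_eq_of_perm_of_pairwise_lt _ _ (fun x => x) hperm (hpw _)]
        apply List.filter_congr
        intro j _; simp [pvMatch]
      · by_cases hC : ch = 'C'
        · rw [hC]
          simp only [pvComp, Char.reduceEq, reduceIte, List.flatMap_cons, List.flatMap_nil, List.append_nil, hfil]
          rw [hsorted_self]
          apply List.filter_congr
          intro j _; simp [pvMatch]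
        · rw [pvComp]
          simp only [if_neg hA, if_neg hU, if_neg hG, if_neg hC, List.flatMap_nil]
          have : (PySem.List.pyRange (i + 4) (cs.length : Int) 1).filter
              (fun j => pvMatch ch (PySem.List.pyGetD cs j ' ')) = [] := by
            apply List.filter_eq_nil_iff.mpr
            intro x _
            simp [pvMatch, hA, hU, hG, hC]
          rw [this]; rfl

theorem B_eq_flatMap (s : String) :
    seq2pairs_alt s = (PySem.List.pyRange 0 (s.toList.length : Int) 1).flatMap (pvRow s.toList) := by
  unfold seq2pairs_alt
  simp only []
  rw [PySem.List.foldl_congr_mem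
    (g := fun out (p : Int × Char) => out ++ pvRow s.toList p.1)]
  · rw [PySem.List.foldl_append_eq_flatMap, List.nil_append,
      PySem.List.enumerate_eq_map_pyRange s.toList ' ', List.flatMap_map]
    simp [PySem.List.len_eq]
  · intro out p hp
    obtain ⟨k, hk, rfl⟩ := (PySem.List.mem_enumerate_iff _ _ _).1 hp
    simp only [zero_add]
    rw [PySem.List.foldl_congr_mem (g := fun out j => out ++ [[(k : Int), j], [j, (k : Int)]])]
    · rw [PySem.List.foldl_append_eq_flatMap]
      congr 1
      simp only [pos_getD]
      have := row_core s.toList (k : Int) (by positivity)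
      rw [pvRow]
      rw [← this]
      congr 1
      · have : PySem.List.pyGetD s.toList (k : Int) ' ' = s.toList[k] := by
          simp [PySem.List.pyGetD_natCast, List.getElem?_eq_getElem hk]
        rw [this]
    · intro acc j _; simp

theorem row_eq_nil (cs : List Char) (i : Int) (h : (cs.length : Int) ≤ i + 4) : pvRow cs i = [] := by
  rw [pvRow, PySem.List.pyRange_one_eq_nil h]
  rfl

-- ===== VERDICT (by name: the statement is the Claim_ definition above) =====
theorem seq2pairs_spec : Claim_equal_seq2pairs := by
  intro s _
  unfold Spec_seq2pairs
  rw [A_eq_flatMap, B_eq_flatMap]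
  set n : Int := (s.toList.length : Int) with hn
  by_cases h : 4 ≤ n
  · rw [PySem.List.pyRange_one_append 0 (n - 4) n (by omega) (by omega), List.flatMap_append]
    have : (PySem.List.pyRange (n - 4) n 1).flatMap (pvRow s.toList) = [] := by
      apply List.flatMap_eq_nil_iff.mpr
      intro i hi
      have := (PySem.List.mem_pyRange_one).1 hi
      exact row_eq_nil _ _ (by omega)
    rw [this, List.append_nil]
  · rw [PySem.List.pyRange_one_eq_nil (a := (0:Int)) (by omega)]
    symm
    apply List.flatMap_eq_nil_iff.mpr
    intro i hi
    have := (PySem.List.mem_pyRange_one).1 hi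
    exact row_eq_nil _ _ (by omega)
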